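-- pv_equiv track=rewrite | github.com/Candysad/leetcode | python/1340.跳跃游戏-v.py | maxJumps
-- ===== SOURCE A (Python) =====
-- from typing import List
--
-- from functools import cache
--
-- def maxJumps(arr: List[int], d: int) -> int:
--     n = len(arr)
--
--     @cache
--     def dfs(i):
--         t = 0
--         # 左
--         for j in range(i-1, max(0, i-d) - 1, -1):
--             if arr[j] >= arr[i]:
--                 break
--             t = max(t, dfs(j))
--
--         # 右
--         for j in range(i+1, min(n, i+d+1)):
--             if arr[j] >= arr[i]:
--                 break
--             t = max(t, dfs(j))
--
--         return t + 1
--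
--     result = 0
--     for i in range(n):
--         result = max(result, dfs(i))
--     return result
-- ===== SOURCE B (Python) =====
-- def maxJumps(arr, d):
--     n = len(arr)
--     order = sorted(range(n), key=lambda i: arr[i])
--     dp = [0] * n
--     for i in order:
--         best = 0
--         j = i - 1
--         while j >= 0 and j >= i - d and arr[j] < arr[i]:
--             best = max(best, dp[j])
--             j -= 1
--         j = i + 1
--         while j < n and j <= i + d and arr[j] < arr[i]:
--             best = max(best, dp[j])
--             j += 1
--         dp[i] = best + 1
--     res = 0
--     for v in dp:
--         res = max(res, v)
--     return res
-- ===== Notes on version B (the rewrite author's own statement) =====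
-- stated objective: alternative
-- what changed: B replaces A's memoized recursive DFS by an iterative bottom-up DP: indices are processed in increasing order of arr value (so every strictly-smaller neighbour is already final) and a dp array is filled with explicit while-loop scans, removing recursion and memoization entirely.
import Mathlib
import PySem

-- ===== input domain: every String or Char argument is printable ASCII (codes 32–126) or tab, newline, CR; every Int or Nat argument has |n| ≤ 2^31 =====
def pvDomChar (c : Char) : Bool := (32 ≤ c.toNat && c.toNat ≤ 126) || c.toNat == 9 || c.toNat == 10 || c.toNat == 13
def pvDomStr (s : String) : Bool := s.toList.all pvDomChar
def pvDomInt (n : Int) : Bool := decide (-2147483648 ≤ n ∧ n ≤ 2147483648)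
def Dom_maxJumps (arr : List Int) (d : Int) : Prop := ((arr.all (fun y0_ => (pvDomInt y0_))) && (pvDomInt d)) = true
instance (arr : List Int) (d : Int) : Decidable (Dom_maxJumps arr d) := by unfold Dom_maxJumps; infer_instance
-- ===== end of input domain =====

-- B replaces A's memoized recursion by an iterative DP filled in increasing order of arr value (alternative decomposition, same results).

-- ===== PORT A =====
-- one 'for j in …: if arr[j] >= arr[i]: break; t = max(t, dfs(j))' loop of A;
-- the @cache memo dict is threaded through explicitly (rec returns value × memo)
def pvLoopAM (arr : List Int) (ai : Int)
    (rec : Int → PySem.Dict Int Int → Int × PySem.Dict Int Int) :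
    List Int → Int × PySem.Dict Int Int → Int × PySem.Dict Int Int
  | [], tm => tm
  | j :: js, tm =>
    if PySem.List.pyGetD arr j 0 ≥ ai then tm
    else
      let vm := rec j tm.2
      pvLoopAM arr ai rec js (max tm.1 vm.1, vm.2)

-- A's dfs with its functools @cache ported as an explicit memo dict (lookup first,
-- store on return); 'fuel' only makes the same recursion total (the proof shows the
-- depth bound 'number of strictly smaller values' keeps fuel from running out).
def pvDfsA (arr : List Int) (d : Int) (n : Int) :
    Nat → Int → PySem.Dict Int Int → Int × PySem.Dict Int Int
  | 0, _, memo => (0, memo)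
  | fuel+1, i, memo =>
    match memo.get? i with
    | some v => (v, memo)
    | none =>
      let ai := PySem.List.pyGetD arr i 0
      let t1 := pvLoopAM arr ai (pvDfsA arr d n fuel)
        (PySem.List.pyRange (i-1) (max 0 (i-d) - 1) (-1)) (0, memo)
      let t2 := pvLoopAM arr ai (pvDfsA arr d n fuel)
        (PySem.List.pyRange (i+1) (min n (i+d+1)) 1) t1
      (t2.1 + 1, t2.2.insert i (t2.1 + 1))

def maxJumps (arr : List Int) (d : Int) : Int :=
  let n := arr.length
  ((PySem.List.pyRange 0 n 1).foldl
    (fun acc i =>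
      let vm := pvDfsA arr d n n i acc.2
      (max acc.1 vm.1, vm.2))
    (0, PySem.Dict.empty)).1

-- ===== PORT B =====
-- 'while j >= 0 and j >= i-d and arr[j] < arr[i]: best = max(best, dp[j]); j -= 1'
-- (the while loop is ported as structural recursion on 'fuel', an upper bound on the
-- iterations left — (j+1).toNat at entry — so it is total; fuel never runs out early)
def pvScanL (arr dp : List Int) (ai lo : Int) : Nat → Int → Int → Int
  | 0, _, best => best
  | fuel+1, j, best =>
    if 0 ≤ j ∧ lo ≤ j ∧ PySem.List.pyGetD arr j 0 < ai then
      pvScanL arr dp ai lo fuel (j-1) (max best (PySem.List.pyGetD dp j 0))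
    else best

-- 'while j < n and j <= i+d and arr[j] < arr[i]: best = max(best, dp[j]); j += 1'
-- (fuel = (n-j).toNat at entry)
def pvScanR (arr dp : List Int) (n ai hi : Int) : Nat → Int → Int → Int
  | 0, _, best => best
  | fuel+1, j, best =>
    if j < n ∧ j ≤ hi ∧ PySem.List.pyGetD arr j 0 < ai then
      pvScanR arr dp n ai hi fuel (j+1) (max best (PySem.List.pyGetD dp j 0))
    else best

-- body of B's 'for i in order' loop
def pvStepB (arr : List Int) (d : Int) (n : Int) (dp : List Int) (i : Int) : List Int :=
  let ai := PySem.List.pyGetD arr i 0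
  let best := pvScanL arr dp ai (i - d) i.toNat (i - 1) 0
  let best := pvScanR arr dp n ai (i + d) (n - (i + 1)).toNat (i + 1) best
  PySem.List.pySetD dp i (best + 1)

def maxJumps_alt (arr : List Int) (d : Int) : Int :=
  let n := arr.length
  let order := PySem.List.sorted (PySem.List.pyRange 0 n 1) (fun i => PySem.List.pyGetD arr i 0) false
  let dp := order.foldl (pvStepB arr d n) (List.replicate n 0)
  dp.foldl (fun r v => max r v) 0

-- ===== PRECONDITION & SPEC =====
def Spec_maxJumps (arr : List Int) (d : Int) (out : Int) : Prop := out = maxJumps_alt arr d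
instance (arr : List Int) (d : Int) (out : Int) : Decidable (Spec_maxJumps arr d out) := by unfold Spec_maxJumps; infer_instance

-- ===== CLAIM (what is proved, stated in full; the proofs are below) =====
def Claim_equal_maxJumps : Prop := ∀ (arr : List Int) (d : Int), Dom_maxJumps arr d → Spec_maxJumps arr d (maxJumps arr d)


-- ===== LEMMAS AND PROOFS =====

-- the final dp array of B's fold
def pvDpF (arr : List Int) (d : Int) : List Int :=
  (PySem.List.sorted (PySem.List.pyRange 0 arr.length 1) (fun i => PySem.List.pyGetD arr i 0) false).foldl
    (pvStepB arr d arr.length) (List.replicate arr.length 0)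

-- number of positions holding a strictly smaller value (termination measure for A's dfs)
def pvCnt (arr : List Int) (x : Int) : Nat :=
  ((Finset.range arr.length).filter (fun p => arr.getD p 0 < x)).card

lemma pvGetD_oob (xs : List Int) (p : Int) (hp : (xs.length : Int) ≤ p) :
    PySem.List.pyGetD xs p 0 = 0 := by
  apply PySem.List.pyGetD_of_none
  rw [PySem.List.pyGet?_eq_none_iff]
  unfold PySem.Raise.InRange
  omega

lemma pvScanL_congr (arr dp1 dp2 : List Int) (ai lo : Int)
    (h : ∀ p : Int, 0 ≤ p → PySem.List.pyGetD arr p 0 < ai →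
         PySem.List.pyGetD dp1 p 0 = PySem.List.pyGetD dp2 p 0) :
    ∀ (fuel : Nat) (j b : Int), pvScanL arr dp1 ai lo fuel j b = pvScanL arr dp2 ai lo fuel j b := by
  intro fuel
  induction fuel with
  | zero => intro j b; rfl
  | succ N ih =>
    intro j b
    simp only [pvScanL]
    by_cases hc : 0 ≤ j ∧ lo ≤ j ∧ PySem.List.pyGetD arr j 0 < ai
    · rw [if_pos hc, if_pos hc, h j hc.1 hc.2.2]
      exact ih (j-1) _
    · rw [if_neg hc, if_neg hc]

lemma pvScanR_congr (arr dp1 dp2 : List Int) (nn ai hi : Int)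
    (h : ∀ p : Int, 0 ≤ p → PySem.List.pyGetD arr p 0 < ai →
         PySem.List.pyGetD dp1 p 0 = PySem.List.pyGetD dp2 p 0) :
    ∀ (fuel : Nat) (j b : Int), 0 ≤ j →
      pvScanR arr dp1 nn ai hi fuel j b = pvScanR arr dp2 nn ai hi fuel j b := by
  intro fuel
  induction fuel with
  | zero => intro j b _; rfl
  | succ N ih =>
    intro j b hj
    simp only [pvScanR]
    by_cases hc : j < nn ∧ j ≤ hi ∧ PySem.List.pyGetD arr j 0 < ai
    · rw [if_pos hc, if_pos hc, h j hj hc.2.2]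
      exact ih (j+1) _ (by omega)
    · rw [if_neg hc, if_neg hc]

lemma pvFold (arr : List Int) (d : Int) :
    ∀ (rest dp : List Int),
      (∀ i ∈ rest, ∃ k : Nat, i = (k : Int) ∧ k < arr.length) →
      rest.Nodup →
      rest.Pairwise (fun a b => PySem.List.pyGetD arr a 0 ≤ PySem.List.pyGetD arr b 0) →
      dp.length = arr.length →
      (rest.foldl (pvStepB arr d arr.length) dp).length = arr.length ∧
      (∀ p : Nat, p < arr.length → (p : Int) ∉ rest →
        PySem.List.pyGetD (rest.foldl (pvStepB arr d arr.length) dp) (p : Int) 0 =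
          PySem.List.pyGetD dp (p : Int) 0) ∧
      (∀ i ∈ rest,
        PySem.List.pyGetD (rest.foldl (pvStepB arr d arr.length) dp) i 0 =
          pvScanR arr (rest.foldl (pvStepB arr d arr.length) dp) arr.length
            (PySem.List.pyGetD arr i 0) (i + d) (((arr.length : Int) - (i + 1)).toNat) (i + 1)
            (pvScanL arr (rest.foldl (pvStepB arr d arr.length) dp)
              (PySem.List.pyGetD arr i 0) (i - d) i.toNat (i - 1) 0) + 1) := by
  intro rest
  induction rest with
  | nil =>
    intro dp h1 h2 h3 hlen
    refine ⟨by simpa using hlen, by simp, by simp⟩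
  | cons i rest' ih =>
    intro dp h1 h2 h3 hlen
    obtain ⟨k, rfl, hk⟩ := h1 i (List.mem_cons_self)
    have h1' : ∀ x ∈ rest', ∃ m : Nat, x = (m : Int) ∧ m < arr.length :=
      fun x hx => h1 x (List.mem_cons_of_mem _ hx)
    have h2' : rest'.Nodup := h2.of_cons
    have hknotin : ((k : Int)) ∉ rest' := (List.nodup_cons.mp h2).1
    have hhead : ∀ b ∈ rest', PySem.List.pyGetD arr (k : Int) 0 ≤ PySem.List.pyGetD arr b 0 :=
      (List.pairwise_cons.mp h3).1
    have h3' : rest'.Pairwise (fun a b => PySem.List.pyGetD arr a 0 ≤ PySem.List.pyGetD arr b 0) :=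
      (List.pairwise_cons.mp h3).2
    -- the written value
    set ai := PySem.List.pyGetD arr (k : Int) 0 with hai
    set w := pvScanR arr dp arr.length ai ((k : Int) + d)
        (((arr.length : Int) - ((k : Int) + 1)).toNat) ((k : Int) + 1)
        (pvScanL arr dp ai ((k : Int) - d) ((k : Int)).toNat ((k : Int) - 1) 0) + 1 with hw
    have hdp' : pvStepB arr d arr.length dp (k : Int) = PySem.List.pySetD dp (k : Int) w := by
      simp only [pvStepB, ← hai, ← hw]
    have hlen' : (PySem.List.pySetD dp (k : Int) w).length = arr.length := by
      rw [PySem.List.pySetD_natCast]; simpa using hlen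
    have hget' : ∀ m : Nat, PySem.List.pyGetD (PySem.List.pySetD dp (k : Int) w) (m : Int) 0 =
        if m = k then w else PySem.List.pyGetD dp (m : Int) 0 :=
      fun m => PySem.List.pyGetD_pySetD_natCast dp k m w 0 (by omega)
    have hfold : (((k : Int) :: rest').foldl (pvStepB arr d arr.length) dp) =
        rest'.foldl (pvStepB arr d arr.length) (PySem.List.pySetD dp (k : Int) w) := by
      simp [List.foldl_cons, hdp']
    obtain ⟨ihlen, ihout, ihfix⟩ := ih (PySem.List.pySetD dp (k : Int) w) h1' h2' h3' hlen'
    set F := rest'.foldl (pvStepB arr d arr.length) (PySem.List.pySetD dp (k : Int) w) with hF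
    -- positions with strictly smaller value are outside (k :: rest')
    have notin : ∀ p : Int, PySem.List.pyGetD arr p 0 < ai → p ∉ ((k : Int) :: rest') := by
      intro p hkey hp
      rcases List.mem_cons.mp hp with rfl | hp'
      · exact absurd hkey (lt_irrefl _)
      · exact absurd hkey (not_lt.mpr (hhead p hp'))
    -- F agrees with dp on every read the scans at k can make
    have hagree : ∀ p : Int, 0 ≤ p → PySem.List.pyGetD arr p 0 < ai →
        PySem.List.pyGetD F p 0 = PySem.List.pyGetD dp p 0 := by
      intro p hp0 hkey
      by_cases hbig : (arr.length : Int) ≤ p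
      · rw [pvGetD_oob F p (by rw [ihlen]; exact hbig), pvGetD_oob dp p (by rw [hlen]; exact hbig)]
      · have hq : p.toNat < arr.length := by omega
        have hpq : p = ((p.toNat : Nat) : Int) := by omega
        have hnotin := notin p hkey
        have h1 : PySem.List.pyGetD F p 0 = PySem.List.pyGetD (PySem.List.pySetD dp (k : Int) w) p 0 := by
          rw [hpq]; exact ihout p.toNat hq (by rw [← hpq]; exact fun hc => hnotin (List.mem_cons_of_mem _ hc))
        rw [h1, hpq, hget' p.toNat, if_neg (by intro hc; apply hnotin; rw [hpq, hc]; exact List.mem_cons_self)]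
    refine ⟨ihlen, ?_, ?_⟩
    · -- untouched positions
      intro p hp hnot
      have hp1 : ((p : Int)) ∉ rest' := fun hc => hnot (List.mem_cons_of_mem _ hc)
      have hp2 : ((p : Int)) ≠ (k : Int) := fun hc => hnot (hc ▸ List.mem_cons_self)
      rw [hfold]
      rw [ihout p hp hp1, hget' p, if_neg (by omega)]
    · -- fixed point at every processed index
      intro x hx
      rw [hfold]
      rcases List.mem_cons.mp hx with rfl | hx'
      · have hxF : PySem.List.pyGetD F (k : Int) 0 = w := by
          rw [show PySem.List.pyGetD F (k : Int) 0 =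
              PySem.List.pyGetD (PySem.List.pySetD dp (k : Int) w) (k : Int) 0 from
            ihout k hk hknotin, hget' k, if_pos rfl]
        have hsl : pvScanL arr F ai ((k : Int) - d) ((k : Int)).toNat ((k : Int) - 1) 0 =
            pvScanL arr dp ai ((k : Int) - d) ((k : Int)).toNat ((k : Int) - 1) 0 :=
          pvScanL_congr arr F dp ai _ hagree _ _ _
        have hsr : pvScanR arr F arr.length ai ((k : Int) + d)
              (((arr.length : Int) - ((k : Int) + 1)).toNat) ((k : Int) + 1)
              (pvScanL arr dp ai ((k : Int) - d) ((k : Int)).toNat ((k : Int) - 1) 0) =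
            pvScanR arr dp arr.length ai ((k : Int) + d)
              (((arr.length : Int) - ((k : Int) + 1)).toNat) ((k : Int) + 1)
              (pvScanL arr dp ai ((k : Int) - d) ((k : Int)).toNat ((k : Int) - 1) 0) :=
          pvScanR_congr arr F dp _ ai _ hagree _ _ _ (by omega)
        rw [hxF, hsl, hsr, ← hw]
      · exact ihfix x hx'

lemma pvCnt_lt (arr : List Int) {p i : Nat} (hp : p < arr.length)
    (hkey : arr.getD p 0 < arr.getD i 0) :
    pvCnt arr (arr.getD p 0) < pvCnt arr (arr.getD i 0) := by
  apply Finset.card_lt_card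
  constructor
  · intro q hq
    simp only [Finset.mem_filter, Finset.mem_range] at *
    exact ⟨hq.1, lt_trans hq.2 hkey⟩
  · intro hsub
    have := hsub (by simp [Finset.mem_filter, Finset.mem_range]; exact ⟨hp, hkey⟩ : p ∈ _)
    simp [Finset.mem_filter] at this

lemma pvCnt_lt_length (arr : List Int) {i : Nat} (hi : i < arr.length) :
    pvCnt arr (arr.getD i 0) < arr.length := by
  have h : ((Finset.range arr.length).filter (fun p => arr.getD p 0 < arr.getD i 0)) ⊂ Finset.range arr.length := by
    constructor
    · exact Finset.filter_subset _ _
    · intro hsub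
      have := hsub (Finset.mem_range.mpr hi)
      simp [Finset.mem_filter] at this
  have := Finset.card_lt_card h
  simpa using this

lemma pvDpF_spec (arr : List Int) (d : Int) :
    (pvDpF arr d).length = arr.length ∧
    (∀ i : Int, 0 ≤ i → i < (arr.length : Int) →
      PySem.List.pyGetD (pvDpF arr d) i 0 =
        pvScanR arr (pvDpF arr d) arr.length (PySem.List.pyGetD arr i 0) (i + d)
          (((arr.length : Int) - (i + 1)).toNat) (i + 1)
          (pvScanL arr (pvDpF arr d) (PySem.List.pyGetD arr i 0) (i - d) i.toNat (i - 1) 0) + 1) := by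
  have h := pvFold arr d
    (PySem.List.sorted (PySem.List.pyRange 0 arr.length 1) (fun i => PySem.List.pyGetD arr i 0) false)
    (List.replicate arr.length 0)
    (by
      intro x hx
      rw [PySem.List.mem_sorted] at hx
      have := PySem.List.mem_pyRange_one.mp hx
      exact ⟨x.toNat, by omega, by omega⟩)
    ((PySem.List.sorted_perm _ _ false).symm.nodup (PySem.List.nodup_pyRange_one 0 _))
    (PySem.List.sorted_pairwise _ _)
    (by simp)
  refine ⟨h.1, ?_⟩
  intro i hi0 hin
  exact h.2.2 i (by rw [PySem.List.mem_sorted]; exact PySem.List.mem_pyRange_one.mpr ⟨hi0, hin⟩)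

lemma pvDfsA_succ_some (arr : List Int) (d n : Int) (c : Nat) (i : Int)
    (memo : PySem.Dict Int Int) (v : Int) (h : memo.get? i = some v) :
    pvDfsA arr d n (c+1) i memo = (v, memo) := by
  rw [pvDfsA, h]

lemma pvDfsA_succ_none (arr : List Int) (d n : Int) (c : Nat) (i : Int)
    (memo : PySem.Dict Int Int) (h : memo.get? i = none) :
    pvDfsA arr d n (c+1) i memo =
      ((pvLoopAM arr (PySem.List.pyGetD arr i 0) (pvDfsA arr d n c)
          (PySem.List.pyRange (i+1) (min n (i+d+1)) 1)
          (pvLoopAM arr (PySem.List.pyGetD arr i 0) (pvDfsA arr d n c)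
            (PySem.List.pyRange (i-1) (max 0 (i-d) - 1) (-1)) (0, memo))).1 + 1,
       PySem.Dict.insert
         (pvLoopAM arr (PySem.List.pyGetD arr i 0) (pvDfsA arr d n c)
          (PySem.List.pyRange (i+1) (min n (i+d+1)) 1)
          (pvLoopAM arr (PySem.List.pyGetD arr i 0) (pvDfsA arr d n c)
            (PySem.List.pyRange (i-1) (max 0 (i-d) - 1) (-1)) (0, memo))).2 i
         ((pvLoopAM arr (PySem.List.pyGetD arr i 0) (pvDfsA arr d n c)
          (PySem.List.pyRange (i+1) (min n (i+d+1)) 1)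
          (pvLoopAM arr (PySem.List.pyGetD arr i 0) (pvDfsA arr d n c)
            (PySem.List.pyRange (i-1) (max 0 (i-d) - 1) (-1)) (0, memo))).1 + 1)) := by
  rw [pvDfsA, h]

lemma pvLoopAM_eq_scanL (arr dp : List Int) (ai lo : Int)
    (rec : Int → PySem.Dict Int Int → Int × PySem.Dict Int Int)
    (P : PySem.Dict Int Int → Prop) :
    ∀ (fuel : Nat) (j t : Int) (memo : PySem.Dict Int Int), (j+1).toNat ≤ fuel → P memo →
      (∀ (p : Int) (m : PySem.Dict Int Int), P m → 0 ≤ p → lo ≤ p → p ≤ j →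
        PySem.List.pyGetD arr p 0 < ai →
        (rec p m).1 = PySem.List.pyGetD dp p 0 ∧ P (rec p m).2) →
      (pvLoopAM arr ai rec (PySem.List.pyRange j (max 0 lo - 1) (-1)) (t, memo)).1
          = pvScanL arr dp ai lo fuel j t ∧
        P (pvLoopAM arr ai rec (PySem.List.pyRange j (max 0 lo - 1) (-1)) (t, memo)).2 := by
  intro fuel
  induction fuel with
  | zero =>
    intro j t memo hN hP h
    rw [PySem.List.pyRange_neg_one_eq_nil (by omega), pvLoopAM]
    exact ⟨rfl, hP⟩
  | succ N ih =>
    intro j t memo hN hP h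
    by_cases hin : 0 ≤ j ∧ lo ≤ j
    · rw [PySem.List.pyRange_neg_one_cons (by omega), pvLoopAM]
      by_cases hbrk : PySem.List.pyGetD arr j 0 ≥ ai
      · rw [if_pos hbrk, pvScanL, if_neg (by omega)]
        exact ⟨rfl, hP⟩
      · rw [not_le] at hbrk
        rw [if_neg (by omega)]
        have hr := h j memo hP hin.1 hin.2 le_rfl hbrk
        rw [pvScanL, if_pos ⟨hin.1, hin.2, hbrk⟩, ← hr.1]
        exact ih (j-1) (max t (rec j memo).1) (rec j memo).2 (by omega) hr.2
          (fun p m hPm h0 hlo hpj hk => h p m hPm h0 hlo (by omega) hk)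
    · rw [PySem.List.pyRange_neg_one_eq_nil (by omega), pvLoopAM, pvScanL,
        if_neg (by omega)]
      exact ⟨rfl, hP⟩

lemma pvLoopAM_eq_scanR (arr dp : List Int) (ai : Int)
    (rec : Int → PySem.Dict Int Int → Int × PySem.Dict Int Int)
    (P : PySem.Dict Int Int → Prop) (nn hi : Int) :
    ∀ (fuel : Nat) (j t : Int) (memo : PySem.Dict Int Int),
      (min nn (hi + 1) - j).toNat ≤ fuel → P memo →
      (∀ (p : Int) (m : PySem.Dict Int Int), P m → j ≤ p → p < nn → p ≤ hi →
        PySem.List.pyGetD arr p 0 < ai →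
        (rec p m).1 = PySem.List.pyGetD dp p 0 ∧ P (rec p m).2) →
      (pvLoopAM arr ai rec (PySem.List.pyRange j (min nn (hi + 1)) 1) (t, memo)).1
          = pvScanR arr dp nn ai hi fuel j t ∧
        P (pvLoopAM arr ai rec (PySem.List.pyRange j (min nn (hi + 1)) 1) (t, memo)).2 := by
  intro fuel
  induction fuel with
  | zero =>
    intro j t memo hN hP h
    rw [PySem.List.pyRange_one_eq_nil (by omega), pvLoopAM]
    exact ⟨rfl, hP⟩
  | succ N ih =>
    intro j t memo hN hP h
    by_cases hin : j < nn ∧ j ≤ hi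
    · rw [PySem.List.pyRange_one_cons (by omega), pvLoopAM]
      by_cases hbrk : PySem.List.pyGetD arr j 0 ≥ ai
      · rw [if_pos hbrk, pvScanR, if_neg (by omega)]
        exact ⟨rfl, hP⟩
      · rw [not_le] at hbrk
        rw [if_neg (by omega)]
        have hr := h j memo hP le_rfl hin.1 hin.2 hbrk
        rw [pvScanR, if_pos ⟨hin.1, hin.2, hbrk⟩, ← hr.1]
        exact ih (j+1) (max t (rec j memo).1) (rec j memo).2 (by omega) hr.2
          (fun p m hPm hjp hpn hphi hk => h p m hPm (by omega) hpn hphi hk)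
    · rw [PySem.List.pyRange_one_eq_nil (by omega), pvLoopAM, pvScanR,
        if_neg (by omega)]
      exact ⟨rfl, hP⟩

-- memo-cache invariant: every cached value is the final dp value at its key
def pvInv (arr : List Int) (d : Int) (memo : PySem.Dict Int Int) : Prop :=
  ∀ (j v : Int), memo.get? j = some v → v = PySem.List.pyGetD (pvDpF arr d) j 0

lemma pvDfsA_eq (arr : List Int) (d : Int) :
    ∀ (fuel : Nat) (i : Nat) (memo : PySem.Dict Int Int),
      i < arr.length → pvCnt arr (arr.getD i 0) < fuel → pvInv arr d memo →
      (pvDfsA arr d arr.length fuel (i : Int) memo).1 =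
          PySem.List.pyGetD (pvDpF arr d) (i : Int) 0 ∧
        pvInv arr d (pvDfsA arr d arr.length fuel (i : Int) memo).2 := by
  intro fuel
  induction fuel with
  | zero => intro i memo hi hc hP; omega
  | succ c ihc =>
    intro i memo hi hc hP
    cases hmemo : memo.get? (i : Int) with
    | some v =>
      rw [pvDfsA_succ_some arr d arr.length c (i : Int) memo v hmemo]
      exact ⟨hP (i : Int) v hmemo, hP⟩
    | none =>
      rw [pvDfsA_succ_none arr d arr.length c (i : Int) memo hmemo]
      have hai : PySem.List.pyGetD arr (i : Int) 0 = arr.getD i 0 := PySem.List.pyGetD_natCast arr i 0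
      have hrec : ∀ (p : Int) (m : PySem.Dict Int Int), pvInv arr d m → 0 ≤ p →
          p < (arr.length : Int) →
          PySem.List.pyGetD arr p 0 < PySem.List.pyGetD arr (i : Int) 0 →
          (pvDfsA arr d arr.length c p m).1 = PySem.List.pyGetD (pvDpF arr d) p 0 ∧
            pvInv arr d (pvDfsA arr d arr.length c p m).2 := by
        intro p m hPm hp0 hpn hkey
        have hpq : p = ((p.toNat : Nat) : Int) := by omega
        rw [hpq]
        apply ihc p.toNat m (by omega) _ hPm
        have hkey' : arr.getD p.toNat 0 < arr.getD i 0 := by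
          rw [← PySem.List.pyGetD_natCast arr p.toNat 0, ← hai, ← hpq]; exact hkey
        exact lt_of_lt_of_le (pvCnt_lt arr (by omega) hkey') (by omega)
      obtain ⟨hL1, hL2⟩ := pvLoopAM_eq_scanL arr (pvDpF arr d) _ ((i : Int) - d)
        (pvDfsA arr d arr.length c) (pvInv arr d) (((i : Int)).toNat) ((i : Int) - 1) 0 memo
        (by omega) hP
        (fun p m hPm h0 hlo hpj hk => hrec p m hPm h0 (by omega) hk)
      set L := pvLoopAM arr (PySem.List.pyGetD arr (i : Int) 0) (pvDfsA arr d arr.length c)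
        (PySem.List.pyRange ((i : Int) - 1) (max 0 ((i : Int) - d) - 1) (-1)) (0, memo) with hL0
      obtain ⟨hR1, hR2⟩ := pvLoopAM_eq_scanR arr (pvDpF arr d) _
        (pvDfsA arr d arr.length c) (pvInv arr d) ((arr.length : Int)) ((i : Int) + d)
        ((((arr.length : Int)) - ((i : Int) + 1)).toNat) ((i : Int) + 1) L.1 L.2
        (by omega) hL2
        (fun p m hPm hjp hpn hphi hk => hrec p m hPm (by omega) hpn hk)
      rw [show (L.1, L.2) = L from rfl] at hR1 hR2
      rw [hL1] at hR1
      constructor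
      · show (pvLoopAM arr (PySem.List.pyGetD arr (i : Int) 0) (pvDfsA arr d arr.length c)
            (PySem.List.pyRange ((i : Int) + 1) (min (arr.length : Int) ((i : Int) + d + 1)) 1)
            L).1 + 1 = _
        rw [hR1]
        exact ((pvDpF_spec arr d).2 (i : Int) (by omega) (by omega)).symm
      · show pvInv arr d (PySem.Dict.insert
            (pvLoopAM arr (PySem.List.pyGetD arr (i : Int) 0) (pvDfsA arr d arr.length c)
              (PySem.List.pyRange ((i : Int) + 1) (min (arr.length : Int) ((i : Int) + d + 1)) 1)
              L).2 (i : Int)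
            ((pvLoopAM arr (PySem.List.pyGetD arr (i : Int) 0) (pvDfsA arr d arr.length c)
              (PySem.List.pyRange ((i : Int) + 1) (min (arr.length : Int) ((i : Int) + d + 1)) 1)
              L).1 + 1))
        intro j v hj
        rw [PySem.Dict.get?_insert] at hj
        by_cases hji : j = (i : Int)
        · rw [if_pos hji] at hj
          cases hj
          rw [hji, hR1]
          exact ((pvDpF_spec arr d).2 (i : Int) (by omega) (by omega)).symm
        · rw [if_neg hji] at hj
          exact hR2 j v hj

lemma pvTopFold (arr : List Int) (d : Int) :
    ∀ (l : List Int), (∀ x ∈ l, ∃ k : Nat, x = (k : Int) ∧ k < arr.length) →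
      ∀ (r : Int) (memo : PySem.Dict Int Int), pvInv arr d memo →
      (l.foldl (fun acc i =>
          let vm := pvDfsA arr d arr.length arr.length i acc.2
          (max acc.1 vm.1, vm.2)) (r, memo)).1 =
        l.foldl (fun acc i => max acc (PySem.List.pyGetD (pvDpF arr d) i 0)) r := by
  intro l
  induction l with
  | nil => intro _ r memo _; rfl
  | cons x l ih =>
    intro hmem r memo hP
    obtain ⟨k, rfl, hk⟩ := hmem x List.mem_cons_self
    obtain ⟨h1, h2⟩ := pvDfsA_eq arr d arr.length k memo hk (pvCnt_lt_length arr hk) hP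
    simp only [List.foldl_cons]
    rw [h1]
    exact ih (fun y hy => hmem y (List.mem_cons_of_mem _ hy)) _ _ h2

theorem maxJumps_spec : Claim_equal_maxJumps := by
  unfold Claim_equal_maxJumps Spec_maxJumps
  intro arr d _
  show ((PySem.List.pyRange 0 arr.length 1).foldl
      (fun acc i =>
        let vm := pvDfsA arr d arr.length arr.length i acc.2
        (max acc.1 vm.1, vm.2)) (0, PySem.Dict.empty)).1 = maxJumps_alt arr d
  rw [pvTopFold arr d (PySem.List.pyRange 0 arr.length 1)
    (by
      intro x hx
      have := PySem.List.mem_pyRange_one.mp hx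
      exact ⟨x.toNat, by omega, by omega⟩)
    0 PySem.Dict.empty
    (by intro j v hj; rw [PySem.Dict.get?_empty] at hj; cases hj)]
  have h2 : ((arr.length : Int)) = ((pvDpF arr d).length : Int) := by
    rw [(pvDpF_spec arr d).1]
  rw [h2]
  exact PySem.List.foldl_pyRange_zero_pyGetD' (pvDpF arr d) 0 (fun r v => max r v) 0
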